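-- pv_equiv track=rewrite | github.com/birocchi/google_kickstart_solutions | 2020/Round C/stable_wall.py | is_wall_stable
-- ===== SOURCE A (Python) =====
-- def is_wall_stable(wall, rows, columns):
--
--     for c in range(columns):
--
--         found_polys = set()
--         current_poly = ''
--
--         for r in reversed(range(rows)):
--
--             poly = wall[r][c]
--
--             if poly not in found_polys:
--                 found_polys.add(poly)
--                 current_poly = poly
--                 continue
--
--             if poly == current_poly:
--                 continue
--
--             return False
--
--     return True
-- ===== SOURCE B (Python) =====
-- def is_wall_stable(wall, rows, columns):
--     # Stable iff, in every column, each letter forms one contiguous run: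
--     # i.e. the number of runs equals the number of distinct letters.
--     for c in range(columns):
--         col = [wall[r][c] for r in range(rows)]
--         runs = (1 if col else 0) + sum(1 for x, y in zip(col, col[1:]) if x != y)
--         if runs != len(set(col)):
--             return False
--     return True
-- ===== Notes on version B (the rewrite author's own statement) =====
-- stated objective: alternative
-- what changed: Per column B counts runs of consecutive equal letters (1 + adjacent-inequality count over the top-down column) and compares with the number of distinct letters, instead of A's bottom-up state machine with a seen-set and a current-letter register.
-- outside the precondition, e.g. on is_wall_stable([[], ['b'], ['a'], ['b']], 4, 1): A returns False, B raises IndexError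
import Mathlib
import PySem

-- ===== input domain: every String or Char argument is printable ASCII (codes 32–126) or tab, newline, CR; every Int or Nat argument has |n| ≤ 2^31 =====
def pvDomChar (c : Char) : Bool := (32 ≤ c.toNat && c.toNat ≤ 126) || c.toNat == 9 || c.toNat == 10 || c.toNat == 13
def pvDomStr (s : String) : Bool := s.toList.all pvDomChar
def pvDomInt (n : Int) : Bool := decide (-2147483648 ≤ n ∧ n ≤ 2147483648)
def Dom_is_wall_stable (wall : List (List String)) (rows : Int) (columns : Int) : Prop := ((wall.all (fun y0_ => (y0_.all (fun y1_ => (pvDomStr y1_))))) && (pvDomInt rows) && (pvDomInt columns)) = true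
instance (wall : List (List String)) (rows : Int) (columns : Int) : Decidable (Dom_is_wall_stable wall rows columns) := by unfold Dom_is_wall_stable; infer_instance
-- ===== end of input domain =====

-- B replaces A's bottom-up seen-set/current-letter state machine by a per-column
-- run count compared with the distinct-letter count (objective: alternative).

-- ===== PORT A =====
-- wall[r][c]; none = IndexError (excluded by Pre_)
def aCell (wall : List (List String)) (r c : Int) : Option String :=
  (PySem.List.pyGet? wall r).bind (fun row => PySem.List.pyGet? row c)

-- the inner 'for r in reversed(range(rows))' loop; state = (found_polys, current_poly)
def aColLoop (wall : List (List String)) (c : Int) :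
    List Int → PySem.Set String → String → Option Bool
  | [], _, _ => some true
  | r :: rs, found, cur =>
    match aCell wall r c with
    | none => none
    | some poly =>
      if poly ∉ found then aColLoop wall c rs (PySem.Set.add found poly) poly
      else if poly = cur then aColLoop wall c rs found cur
      else some false

-- the outer 'for c in range(columns)' loop
def aOuter (wall : List (List String)) (rows : Int) : List Int → Option Bool
  | [] => some true
  | c :: cs =>
    match aColLoop wall c ((PySem.List.pyRange 0 rows 1).reverse) PySem.Set.empty "" with
    | none => none
    | some false => some false
    | some true => aOuter wall rows cs

def is_wall_stable (wall : List (List String)) (rows : Int) (columns : Int) : Bool :=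
  -- .getD false is never reached under Pre_ (none = IndexError)
  (aOuter wall rows (PySem.List.pyRange 0 columns 1)).getD false

-- ===== PORT B =====
def bCell (wall : List (List String)) (r c : Int) : Option String :=
  (PySem.List.pyGet? wall r).bind (fun row => PySem.List.pyGet? row c)

-- col = [wall[r][c] for r in range(rows)]
def bColumn (wall : List (List String)) (rows c : Int) : Option (List String) :=
  (PySem.List.pyRange 0 rows 1).mapM (fun r => bCell wall r c)

-- runs = (1 if col else 0) + sum(1 for x, y in zip(col, col[1:]) if x != y)
def bRuns (col : List String) : Nat :=
  (if col = [] then 0 else 1) +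
    (col.zip (PySem.List.slice col (some 1) none)).countP (fun p => p.1 != p.2)

-- runs != len(set(col))  (negated: the column is fine)
def bCheck (col : List String) : Bool :=
  bRuns col == (PySem.Set.ofList col).length

def bOuter (wall : List (List String)) (rows : Int) : List Int → Option Bool
  | [] => some true
  | c :: cs =>
    match bColumn wall rows c with
    | none => none
    | some col => if bCheck col then bOuter wall rows cs else some false

def is_wall_stable_alt (wall : List (List String)) (rows : Int) (columns : Int) : Bool :=
  -- .getD false is never reached under Pre_ (none = IndexError)
  (bOuter wall rows (PySem.List.pyRange 0 columns 1)).getD false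

-- ===== PRECONDITION & SPEC =====
-- Pre_ excludes exactly the walls on which indexing wall[r][c] can raise IndexError:
-- when both loops run, every row index < rows must exist in wall and every such row
-- must have at least `columns` cells. (A may return False before reaching a bad
-- index in its bottom-up scan while B's column comprehension raises there; see cites.)
def Pre_is_wall_stable (wall : List (List String)) (rows : Int) (columns : Int) : Prop :=
  0 < rows → 0 < columns →
    rows ≤ (wall.length : Int) ∧ ∀ row ∈ wall.take rows.toNat, columns ≤ (row.length : Int)

instance (wall : List (List String)) (rows : Int) (columns : Int) : Decidable (Pre_is_wall_stable wall rows columns) := by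
  unfold Pre_is_wall_stable; infer_instance

def pvWitness_is_wall_stable : List (List String) × Int × Int :=
  ([["a", "b"], ["a", "b"]], 2, 2)

def Spec_is_wall_stable (wall : List (List String)) (rows : Int) (columns : Int) (out : Bool) : Prop := out = is_wall_stable_alt wall rows columns
instance (wall : List (List String)) (rows : Int) (columns : Int) (out : Bool) : Decidable (Spec_is_wall_stable wall rows columns out) := by unfold Spec_is_wall_stable; infer_instance

-- ===== CLAIM (what is proved, stated in full; the proofs are below) =====
def Claim_equal_is_wall_stable : Prop := ∀ (wall : List (List String)) (rows : Int) (columns : Int), Dom_is_wall_stable wall rows columns → Pre_is_wall_stable wall rows columns → Spec_is_wall_stable wall rows columns (is_wall_stable wall rows columns)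

-- ===== LEMMAS AND PROOFS =====

-- run keys of a list: first elements of maximal runs of equal adjacent values
def goK (p : String) : List String → List String
  | [] => []
  | x :: xs => if x = p then goK p xs else x :: goK x xs

def runKeys : List String → List String
  | [] => []
  | a :: l => a :: goK a l

-- pure version of A's inner state machine
def okP : List String → PySem.Set String → String → Bool
  | [], _, _ => true
  | p :: rest, found, cur =>
    if p ∉ found then okP rest (PySem.Set.add found p) p
    else if p = cur then okP rest found cur
    else false

theorem okP_iff (l : List String) : ∀ (found : PySem.Set String) (cur : String),
    cur ∈ found →
    (okP l found cur = true ↔ (goK cur l).Nodup ∧ ∀ x ∈ goK cur l, x ∉ found) := by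
  induction l with
  | nil => intro found cur _; simp [okP, goK]
  | cons p rest ih =>
    intro found cur hcur
    by_cases hp : p ∈ found
    · by_cases hpc : p = cur
      · subst hpc
        simpa [okP, hp, goK] using ih found p hp
      · simp only [okP, hp, not_true_eq_false, ite_false, if_neg hpc]
        simp only [goK, if_neg hpc]
        constructor
        · intro h; cases h
        · rintro ⟨_, h2⟩
          exact absurd hp (h2 p (List.mem_cons_self ..))
    · have hpc : p ≠ cur := fun h => hp (h ▸ hcur)
      have hmem : p ∈ PySem.Set.add found p := by
        rw [PySem.Set.mem_add]; exact Or.inr rfl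
      simp only [okP, hp, not_false_eq_true, if_pos, goK, if_neg hpc]
      rw [ih (PySem.Set.add found p) p hmem]
      constructor
      · rintro ⟨hnd, hall⟩
        have hpg : p ∉ goK p rest := fun hpg => by
          have := hall p hpg
          rw [PySem.Set.mem_add] at this
          exact this (Or.inr rfl)
        refine ⟨List.nodup_cons.mpr ⟨hpg, hnd⟩, ?_⟩
        intro x hx
        rcases List.mem_cons.mp hx with h | h
        · exact h ▸ hp
        · intro hxf
          have := hall x h
          rw [PySem.Set.mem_add] at this
          exact this (Or.inl hxf)
      · rintro ⟨hnd, hall⟩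
        obtain ⟨hpg, hnd'⟩ := List.nodup_cons.mp hnd
        refine ⟨hnd', ?_⟩
        intro x hx hxm
        rw [PySem.Set.mem_add] at hxm
        rcases hxm with h | h
        · exact hall x (List.mem_cons_of_mem _ hx) h
        · exact hpg (h ▸ hx)

theorem okP_start (l : List String) :
    (okP l PySem.Set.empty "" = true) ↔ (runKeys l).Nodup := by
  cases l with
  | nil => simp [okP, runKeys]
  | cons p rest =>
    have hne : p ∉ PySem.Set.empty := by simp [PySem.Set.empty]
    have hadd : PySem.Set.add PySem.Set.empty p = [p] := by
      rw [PySem.Set.add_of_not_mem hne]; rfl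
    have hmem : p ∈ ([p] : PySem.Set String) := List.mem_singleton.mpr rfl
    simp only [okP, hne, not_false_eq_true, if_pos, hadd]
    rw [okP_iff rest [p] p hmem]
    show _ ↔ (p :: goK p rest).Nodup
    rw [List.nodup_cons]
    constructor
    · rintro ⟨hnd, hall⟩
      exact ⟨fun hpg => (hall p hpg) (List.mem_singleton.mpr rfl), hnd⟩
    · rintro ⟨hpg, hnd⟩
      exact ⟨hnd, fun x hx hxs => hpg ((List.mem_singleton.mp hxs) ▸ hx)⟩

theorem goK_append (m : List String) : ∀ (p : String) (n : List String),
    goK p (m ++ n) = goK p m ++ goK (List.getLastD (goK p m) p) n := by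
  induction m with
  | nil => intro p n; simp [goK]
  | cons x m ih =>
    intro p n
    by_cases hxp : x = p
    · subst hxp
      simp only [List.cons_append, goK, if_pos]
      exact ih x n
    · simp only [List.cons_append, goK, if_neg hxp, List.getLastD_cons]
      rw [ih x n]

theorem runKeys_reverse (l : List String) :
    runKeys l.reverse = (runKeys l).reverse := by
  induction l with
  | nil => rfl
  | cons a t ih =>
    cases t with
    | nil => simp [runKeys, goK]
    | cons b t' =>
      obtain ⟨h, m, hrev⟩ : ∃ h m, (b :: t').reverse = h :: m := by
        cases e : (b :: t').reverse with
        | nil => exact absurd e (by simp)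
        | cons h m => exact ⟨h, m, rfl⟩
      have hkey : h :: goK h m = (goK b t').reverse ++ [b] := by
        have h1 := ih
        rw [hrev] at h1
        show runKeys (h :: m) = _
        rw [h1]
        show ((b :: goK b t') : List String).reverse = _
        simp
      have hK : List.getLastD (goK h m) h = b := by
        have h2 : (h :: goK h m).getLastD "" = b := by rw [hkey]; simp
        rwa [List.getLastD_cons] at h2
      have hL : (a :: b :: t').reverse = h :: (m ++ [a]) := by
        have hh : t'.reverse ++ [b] = h :: m := by simpa using hrev
        simp [List.reverse_cons, hh]
      rw [hL]
      show h :: goK h (m ++ [a]) = _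
      rw [goK_append m h [a], hK]
      by_cases hab : a = b
      · subst hab
        have e1 : goK a [a] = ([] : List String) := by simp [goK]
        have e2 : runKeys (a :: a :: t') = runKeys (a :: t') := by
          show a :: goK a (a :: t') = a :: goK a t'
          simp [goK]
        rw [e1, e2, List.append_nil]
        have := hkey
        rw [show ((goK a t').reverse ++ [a] : List String) = (a :: goK a t').reverse from by simp] at this
        exact this
      · have e1 : goK b [a] = [a] := by simp [goK, hab]
        rw [e1, ← List.cons_append, hkey]
        show _ = ((a :: goK a (b :: t')) : List String).reverse
        have hba : ¬ b = a := fun hh => hab hh.symm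
        have : goK a (b :: t') = b :: goK b t' := by
          simp [goK, hba]
        rw [this]
        simp

theorem length_goK (l : List String) : ∀ p : String,
    (goK p l).length = ((p :: l).zip l).countP (fun q => q.1 != q.2) := by
  induction l with
  | nil => intro p; simp [goK]
  | cons x xs ih =>
    intro p
    have hz : ((p :: x :: xs).zip (x :: xs)) = (p, x) :: ((x :: xs).zip xs) := rfl
    rw [hz, List.countP_cons]
    by_cases hxp : x = p
    · subst hxp
      have e : goK x (x :: xs) = goK x xs := by simp [goK]
      rw [e, ih x]
      simp
    · simp only [goK, if_neg hxp, List.length_cons]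
      rw [ih x]
      have hbne : (p != x) = true := bne_iff_ne.mpr (fun hh => hxp hh.symm)
      rw [hbne]
      simp [Nat.add_comm]

theorem bRuns_eq (col : List String) : bRuns col = (runKeys col).length := by
  cases col with
  | nil => rfl
  | cons a l =>
    show (if (a :: l : List String) = [] then 0 else 1) + _ = _
    rw [if_neg (by simp)]
    rw [PySem.List.slice_from_one]
    show 1 + ((a :: l).zip l).countP (fun q => q.1 != q.2) = (a :: goK a l).length
    rw [← length_goK l a]
    simp [Nat.add_comm]

theorem mem_goK_cons (l : List String) : ∀ (p y : String),
    (y ∈ p :: goK p l) ↔ (y ∈ p :: l) := by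
  induction l with
  | nil => intro p y; simp [goK]
  | cons x xs ih =>
    intro p y
    by_cases hxp : x = p
    · subst hxp
      have e : goK x (x :: xs) = goK x xs := by simp [goK]
      rw [e, ih x]
      simp
    · simp only [goK, if_neg hxp]
      have h1 := ih x y
      simp only [List.mem_cons] at h1 ⊢
      tauto

theorem bCheck_iff (col : List String) :
    (bCheck col = true) ↔ (runKeys col).Nodup := by
  have hbeq : (bCheck col = true) ↔ bRuns col = (PySem.Set.ofList col).length := by
    simp [bCheck]
  rw [hbeq, bRuns_eq]
  have hmemS : ∀ y, y ∈ PySem.Set.ofList col ↔ y ∈ col := fun y => PySem.Set.mem_ofList ..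
  have hmemR : ∀ y, y ∈ runKeys col ↔ y ∈ col := by
    cases col with
    | nil => intro y; rfl
    | cons a l => exact fun y => mem_goK_cons l a y
  have hfinR : (runKeys col).toFinset = col.toFinset := by
    ext y; simp only [List.mem_toFinset]; exact hmemR y
  have hfinS : (PySem.Set.ofList col).toFinset = col.toFinset := by
    ext y; simp only [List.mem_toFinset]; exact hmemS y
  have hcardS : (PySem.Set.ofList col).toFinset.card = (PySem.Set.ofList col).length :=
    List.toFinset_card_of_nodup (PySem.Set.nodup_ofList ..)
  constructor
  · intro hlen
    have h1 : (runKeys col).dedup.length = (runKeys col).toFinset.card :=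
      (List.card_toFinset _).symm
    have h2 : (runKeys col).dedup.length = (runKeys col).length := by
      rw [h1, hfinR, ← hfinS, hcardS, ← hlen]
    have h3 : (runKeys col).dedup = runKeys col :=
      (List.dedup_sublist _).eq_of_length h2
    exact List.dedup_eq_self.mp h3
  · intro hnd
    have h1 : (runKeys col).toFinset.card = (runKeys col).length :=
      List.toFinset_card_of_nodup hnd
    rw [← h1, hfinR, ← hfinS, hcardS]

theorem colEquiv (col : List String) :
    okP col.reverse PySem.Set.empty "" = bCheck col := by
  have h1 : (okP col.reverse PySem.Set.empty "" = true) ↔ (runKeys col).Nodup := by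
    rw [okP_start, runKeys_reverse, List.nodup_reverse]
  have h2 := bCheck_iff col
  cases hb : bCheck col
  · rw [hb] at h2
    have hnot : ¬ (runKeys col).Nodup := fun hh => by
      have := h2.mpr hh; cases this
    have : okP col.reverse PySem.Set.empty "" ≠ true := fun hh => hnot (h1.mp hh)
    simpa using this
  · rw [hb] at h2
    exact h1.mpr (h2.mp rfl)

theorem aColLoop_eq (wall : List (List String)) (c : Int) :
    ∀ (rs : List Int) (found : PySem.Set String) (cur : String),
    (∀ r ∈ rs, (aCell wall r c).isSome) →
    aColLoop wall c rs found cur =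
      some (okP (rs.map fun r => (aCell wall r c).getD "") found cur) := by
  intro rs
  induction rs with
  | nil => intro found cur _; rfl
  | cons r rs ih =>
    intro found cur h
    obtain ⟨s, hs⟩ := Option.isSome_iff_exists.mp (h r (List.mem_cons_self ..))
    have hrest : ∀ r' ∈ rs, (aCell wall r' c).isSome :=
      fun r' hr' => h r' (List.mem_cons_of_mem _ hr')
    have hmap : ((r :: rs).map fun r => (aCell wall r c).getD "") =
        s :: (rs.map fun r => (aCell wall r c).getD "") := by
      simp [hs]
    rw [hmap]
    show (match aCell wall r c with
      | none => none
      | some poly =>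
        if poly ∉ found then aColLoop wall c rs (PySem.Set.add found poly) poly
        else if poly = cur then aColLoop wall c rs found cur
        else some false) = _
    rw [hs]
    show (if s ∉ found then aColLoop wall c rs (PySem.Set.add found s) s
        else if s = cur then aColLoop wall c rs found cur
        else some false) =
      some (if s ∉ found then
          okP (rs.map fun r => (aCell wall r c).getD "") (PySem.Set.add found s) s
        else if s = cur then okP (rs.map fun r => (aCell wall r c).getD "") found cur
        else false)
    split_ifs with h1 h2 <;> first | rfl | exact ih _ _ hrest

theorem mapM_of_forall_some (rs : List Int) (f : Int → Option String)
    (h : ∀ r ∈ rs, (f r).isSome) :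
    rs.mapM f = some (rs.map fun r => (f r).getD "") := by
  induction rs with
  | nil => rfl
  | cons r rs ih =>
    obtain ⟨v, hv⟩ := Option.isSome_iff_exists.mp (h r (List.mem_cons_self ..))
    have := ih (fun r' hr' => h r' (List.mem_cons_of_mem _ hr'))
    simp [List.mapM_cons, hv, this]

theorem outer_eq (wall : List (List String)) (rows : Int) :
    ∀ cs : List Int,
    (∀ c ∈ cs, ∃ (b : Bool) (col : List String),
      aColLoop wall c ((PySem.List.pyRange 0 rows 1).reverse) PySem.Set.empty "" = some b ∧
      bColumn wall rows c = some col ∧ b = bCheck col) →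
    aOuter wall rows cs = bOuter wall rows cs := by
  intro cs
  induction cs with
  | nil => intro _; rfl
  | cons c cs ih =>
    intro h
    obtain ⟨b, col, hb, hcol, heq⟩ := h c (List.mem_cons_self ..)
    have hrest := fun c' hc' => h c' (List.mem_cons_of_mem _ hc')
    show (match aColLoop wall c ((PySem.List.pyRange 0 rows 1).reverse) PySem.Set.empty "" with
      | none => none
      | some false => some false
      | some true => aOuter wall rows cs) =
      (match bColumn wall rows c with
      | none => none
      | some col => if bCheck col then bOuter wall rows cs else some false)
    rw [hb, hcol]
    cases b
    · show some false = if bCheck col = true then bOuter wall rows cs else some false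
      rw [if_neg (fun hh => by simp [← heq] at hh)]
    · show aOuter wall rows cs = if bCheck col = true then bOuter wall rows cs else some false
      rw [if_pos heq.symm]
      exact ih hrest

-- ===== VERDICT (by name: the statement is the Claim_ definition above) =====
theorem is_wall_stable_spec : Claim_equal_is_wall_stable := by
  intro wall rows columns _ hpre
  unfold Spec_is_wall_stable is_wall_stable is_wall_stable_alt
  suffices h : aOuter wall rows (PySem.List.pyRange 0 columns 1) =
      bOuter wall rows (PySem.List.pyRange 0 columns 1) by rw [h]
  apply outer_eq
  intro c hc
  rw [PySem.List.mem_pyRange_one] at hc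
  by_cases hr : 0 < rows
  · have hcols : 0 < columns := lt_of_le_of_lt hc.1 hc.2
    obtain ⟨hlen, hrows⟩ := hpre hr hcols
    have hcell : ∀ r ∈ PySem.List.pyRange 0 rows 1, (aCell wall r c).isSome := by
      intro r hrm
      rw [PySem.List.mem_pyRange_one] at hrm
      have hr1 : r < (wall.length : Int) := lt_of_lt_of_le hrm.2 hlen
      have hrn : r.toNat < wall.length := by omega
      have e1 : PySem.List.pyGet? wall r = some (wall[r.toNat]'hrn) :=
        PySem.List.pyGet?_eq_some_getElem wall hrm.1 hr1
      have htk : r.toNat < (wall.take rows.toNat).length := by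
        simp [List.length_take]; omega
      have hmemrow : wall[r.toNat]'hrn ∈ wall.take rows.toNat := by
        have := List.getElem_mem htk
        rwa [List.getElem_take] at this
      have hcollen := hrows _ hmemrow
      have e2 : PySem.List.pyGet? (wall[r.toNat]'hrn) c =
          some ((wall[r.toNat]'hrn)[c.toNat]'(by omega)) :=
        PySem.List.pyGet?_eq_some_getElem _ hc.1 (lt_of_lt_of_le hc.2 hcollen)
      simp [aCell, e1, e2]
    have hcellrev : ∀ r ∈ (PySem.List.pyRange 0 rows 1).reverse, (aCell wall r c).isSome :=
      fun r hrm => hcell r (List.mem_reverse.mp hrm)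
    refine ⟨_, _, aColLoop_eq wall c _ PySem.Set.empty "" hcellrev,
      mapM_of_forall_some _ (fun r => bCell wall r c) hcell, ?_⟩
    rw [List.map_reverse]
    exact colEquiv ((PySem.List.pyRange 0 rows 1).map fun r => (aCell wall r c).getD "")
  · have hnil : PySem.List.pyRange 0 rows 1 = [] := PySem.List.pyRange_one_eq_nil (by omega)
    refine ⟨true, [], by simp [hnil, aColLoop], by simp [bColumn, hnil], by decide⟩
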